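-- pv_equiv track=rewrite | github.com/turbosheep44/DSA_Assignment | logic/tester.py | solution
-- ===== SOURCE A (Python) =====
-- def solution(ranks):
--     # create a dictionary of ranks
--     rankDictionary = {}
--
--     # add each rank to the dictonary
--     for rank in ranks:
--         if rank in rankDictionary:
--             rankDictionary[rank] += 1
--         else:
--             rankDictionary[rank] = 1
--
--     # a variable storing the number of soldiers that have a superior to report to
--     total = 0
--
--     # go through every rank (key) in the dictionary
--     for rank in rankDictionary.keys():
--         # add the subordinates of this rank (if there are any) to the total
--         if rank - 1 in rankDictionary:
--             total += rankDictionary[rank - 1]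
--
--     # return the total
--     return total
-- ===== SOURCE B (Python) =====
-- def solution(ranks):
--     # count soldiers whose immediate superior rank (rank+1) is present
--     ranks = list(ranks)
--     present = set(ranks)
--     return sum(1 for x in ranks if x + 1 in present)
-- ===== Notes on version B (the rewrite author's own statement) =====
-- stated objective: simpler
-- what changed: Replaces A's Counter build plus a second pass over distinct keys adding stored counts at rank-1 with a one-pass membership set and a direct count of elements whose successor rank is present.
import Mathlib
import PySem

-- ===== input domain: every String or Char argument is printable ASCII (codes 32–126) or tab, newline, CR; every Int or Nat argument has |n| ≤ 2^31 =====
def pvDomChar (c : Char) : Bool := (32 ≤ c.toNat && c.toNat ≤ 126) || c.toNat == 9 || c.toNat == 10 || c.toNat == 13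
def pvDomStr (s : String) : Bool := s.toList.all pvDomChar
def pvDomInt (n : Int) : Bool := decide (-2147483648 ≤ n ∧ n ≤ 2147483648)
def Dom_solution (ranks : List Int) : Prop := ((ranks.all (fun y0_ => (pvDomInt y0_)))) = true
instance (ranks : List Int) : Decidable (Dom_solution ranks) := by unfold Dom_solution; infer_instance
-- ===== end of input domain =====

-- B replaces A's Counter-then-iterate-distinct-keys (adding stored counts at rank-1)
-- with a membership set and a direct count of elements whose successor rank is present (simpler).

-- ===== PORT A =====
def solution (ranks : List Int) : Int :=
  let rankDictionary :=
    ranks.foldl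
      (fun d rank =>
        if d.contains rank then d.insert rank (d.getD rank 0 + 1)
        else d.insert rank 1)
      PySem.Dict.empty
  rankDictionary.keys.foldl
    (fun total rank =>
      if rankDictionary.contains (rank - 1) then total + rankDictionary.getD (rank - 1) 0
      else total)
    0

-- ===== PORT B =====
def solution_alt (ranks : List Int) : Int :=
  let present : PySem.Set Int := PySem.Set.ofList ranks
  (ranks.countP (fun x => PySem.Set.contains present (x + 1)) : Int)

-- ===== PRECONDITION & SPEC =====
def Spec_solution (ranks : List Int) (out : Int) : Prop := out = solution_alt ranks
instance (ranks : List Int) (out : Int) : Decidable (Spec_solution ranks out) := by unfold Spec_solution; infer_instance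

-- ===== CLAIM (what is proved, stated in full; the proofs are below) =====
def Claim_equal_solution : Prop := ∀ (ranks : List Int), Dom_solution ranks → Spec_solution ranks (solution ranks)

-- ===== LEMMAS AND PROOFS =====

-- A's build loop is exactly PySem's counter
lemma dictA_eq_counter (ranks : List Int) :
    ranks.foldl
      (fun d rank =>
        if d.contains rank then d.insert rank (d.getD rank 0 + 1)
        else d.insert rank 1)
      PySem.Dict.empty = PySem.Dict.counter ranks := by
  rw [← PySem.Dict.foldl_insert_getD_add_one_eq_counter]
  congr 1
  funext d r
  by_cases h : d.contains r
  · simp [h]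
  · simp [h, PySem.Dict.getD_of_not_contains _ _ (by simpa using h)]

-- regrouping: countP over the list as a sum of counts over the distinct elements
lemma countP_eq_sum_int (ranks : List Int) (p : Int → Bool) :
    (ranks.countP p : Int)
      = ∑ x ∈ ranks.toFinset, (if p x then (ranks.count x : Int) else 0) := by
  have h1 : ranks.countP p = ∑ a ∈ ranks.toFinset with p a, ranks.count a := by
    rw [List.countP_eq_length_filter, ← List.sum_toFinset_count_eq_length (ranks.filter p),
      List.toFinset_filter]
    apply Finset.sum_congr rfl
    intro a ha
    exact List.count_filter (by simpa using (Finset.mem_filter.mp ha).2)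
  rw [h1, Finset.sum_filter]
  push_cast
  rfl

lemma key_lemma (ranks : List Int) :
    ((PySem.Set.ofList ranks).map
      (fun r => if (r - 1) ∈ ranks then (ranks.count (r - 1) : Int) else 0)).sum
      = (ranks.countP (fun x => decide ((x + 1) ∈ ranks)) : Int) := by
  rw [← List.sum_toFinset _ (PySem.Set.nodup_ofList ranks)]
  have hT : (PySem.Set.ofList ranks).toFinset = ranks.toFinset := by
    ext a; simp [PySem.Set.mem_ofList]
  rw [hT, countP_eq_sum_int]
  simp only [decide_eq_true_eq]
  rw [← Finset.sum_filter, ← Finset.sum_filter]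
  apply Finset.sum_nbij' (i := fun r => r - 1) (j := fun s => s + 1)
  · intro a ha
    simp only [Finset.mem_filter, List.mem_toFinset] at *
    exact ⟨ha.2, by simpa using ha.1⟩
  · intro a ha
    simp only [Finset.mem_filter, List.mem_toFinset] at *
    exact ⟨ha.2, by simpa using ha.1⟩
  · intro a _; ring
  · intro a _; ring
  · intro a _; rfl

-- ===== VERDICT (by name: the statement is the Claim_ definition above) =====
theorem solution_spec : Claim_equal_solution := by
  intro ranks _
  unfold Spec_solution solution solution_alt
  simp only [dictA_eq_counter, PySem.Dict.keys_counter, PySem.Dict.contains_counter,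
    PySem.Dict.getD_counter, PySem.Set.contains_eq_listContains]
  have hbody : (fun (total : Int) (rank : Int) =>
      if ranks.contains (rank - 1) then total + (ranks.count (rank - 1) : Int) else total)
      = fun total rank =>
      total + (if (rank - 1) ∈ ranks then (ranks.count (rank - 1) : Int) else 0) := by
    funext t r
    by_cases h : (r - 1) ∈ ranks <;> simp [h]
  rw [hbody, PySem.List.foldl_add, zero_add, key_lemma]
  congr 1
  apply List.countP_congr
  intro x _
  simp [PySem.Set.mem_ofList]
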